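-- pv_equiv track=rewrite | github.com/joon623/algorithms | greedy/example1.py | solution
-- ===== SOURCE A (Python) =====
-- def solution(n, lost, reserve):
--     if len(lost) == 0:
--         return n
--
--     count = 0
--     count = count - len(lost)
--
--     for num in reserve:
--         min = num - 1
--         max = num + 1
--         for los in lost:
--             if min <= los and max >= los:
--                 count = count + 1
--
--     return count
-- ===== SOURCE B (Python) =====
-- def solution(n, lost, reserve):
--     if not lost:
--         return n
--     cnt = {}
--     for los in lost:
--         cnt[los] = cnt.get(los, 0) + 1
--     total = -len(lost)
--     for num in reserve:
--         total += cnt.get(num - 1, 0) + cnt.get(num, 0) + cnt.get(num + 1, 0)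
--     return total
-- ===== Notes on version B (the rewrite author's own statement) =====
-- stated objective: faster
-- what changed: Replaces the nested scan of lost inside the reserve loop by a frequency dictionary built once over lost, then a single pass over reserve summing the counts of num-1, num and num+1.
import Mathlib
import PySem

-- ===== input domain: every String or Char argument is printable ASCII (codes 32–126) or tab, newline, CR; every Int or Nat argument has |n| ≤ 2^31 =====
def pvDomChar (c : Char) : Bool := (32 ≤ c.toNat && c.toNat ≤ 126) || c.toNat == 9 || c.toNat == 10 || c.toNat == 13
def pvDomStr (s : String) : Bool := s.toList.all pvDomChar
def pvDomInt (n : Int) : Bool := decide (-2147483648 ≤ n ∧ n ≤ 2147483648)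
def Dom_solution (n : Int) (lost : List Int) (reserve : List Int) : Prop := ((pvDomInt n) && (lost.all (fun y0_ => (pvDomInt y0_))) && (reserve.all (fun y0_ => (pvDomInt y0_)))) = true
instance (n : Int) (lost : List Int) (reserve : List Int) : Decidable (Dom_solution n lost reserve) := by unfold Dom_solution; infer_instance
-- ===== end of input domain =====

-- B builds a frequency dictionary over lost once and sums counts per reserve number (faster; A does a nested scan).

-- ===== PORT A =====
def solution (n : Int) (lost : List Int) (reserve : List Int) : Int :=
  if lost.length == 0 then n
  else
    let count : Int := 0
    let count := count - (lost.length : Int)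
    reserve.foldl (fun count num =>
      let min := num - 1
      let max := num + 1
      lost.foldl (fun count los =>
        if min ≤ los ∧ max ≥ los then count + 1 else count) count) count

-- ===== PORT B =====
def solution_alt (n : Int) (lost : List Int) (reserve : List Int) : Int :=
  if lost == [] then n
  else
    let cnt := lost.foldl (fun d los => d.insert los (d.getD los 0 + 1)) (PySem.Dict.empty : PySem.Dict Int Int)
    reserve.foldl (fun total num =>
      total + (cnt.getD (num - 1) 0 + cnt.getD num 0 + cnt.getD (num + 1) 0))
      (-(lost.length : Int))

-- ===== PRECONDITION & SPEC =====
def Spec_solution (n : Int) (lost : List Int) (reserve : List Int) (out : Int) : Prop := out = solution_alt n lost reserve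
instance (n : Int) (lost : List Int) (reserve : List Int) (out : Int) : Decidable (Spec_solution n lost reserve out) := by unfold Spec_solution; infer_instance

-- ===== CLAIM (what is proved, stated in full; the proofs are below) =====
def Claim_equal_solution : Prop := ∀ (n : Int) (lost : List Int) (reserve : List Int), Dom_solution n lost reserve → Spec_solution n lost reserve (solution n lost reserve)

-- ===== LEMMAS AND PROOFS =====

-- the window [num-1, num+1] catches exactly the values num-1, num, num+1
lemma countP_window (num : Int) (l : List Int) :
    l.countP (fun los => decide (num - 1 ≤ los ∧ num + 1 ≥ los))
      = l.count (num - 1) + l.count num + l.count (num + 1) := by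
  induction l with
  | nil => simp
  | cons x l ih =>
      simp only [List.countP_cons, List.count_cons, ih]
      by_cases h1 : x = num - 1 <;> by_cases h2 : x = num <;> by_cases h3 : x = num + 1 <;>
        simp [h1, h2, h3] <;> first | omega | (split_ifs <;> omega)

theorem solution_spec : Claim_equal_solution := by
  unfold Claim_equal_solution Spec_solution solution solution_alt
  intro n lost reserve _
  by_cases h : lost = []
  · simp [h]
  · simp only [h, List.length_eq_zero_iff, beq_iff_eq]
    rw [PySem.Dict.foldl_insert_getD_add_one_eq_counter]
    have hstep : (fun (count : Int) num =>
        lost.foldl (fun count los =>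
          if num - 1 ≤ los ∧ num + 1 ≥ los then count + 1 else count) count)
        = (fun (total : Int) num =>
        total + ((PySem.Dict.counter lost).getD (num - 1) 0
          + (PySem.Dict.counter lost).getD num 0
          + (PySem.Dict.counter lost).getD (num + 1) 0)) := by
      funext total num
      rw [PySem.List.foldl_ite_add_one, PySem.Dict.getD_counter,
        PySem.Dict.getD_counter, PySem.Dict.getD_counter, countP_window]
      push_cast
      ring
    rw [hstep]
    norm_num
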